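-- pv_equiv track=rewrite | github.com/sntiago05/geometric_calculator | utils/validators.py | validar_entry
-- ===== SOURCE A (Python) =====
-- def validar_entry(texto):
--     if texto == "":
--         return True
--     if not all(c.isdigit() or c == "." for c in texto):
--         return False
--     if texto.count(".") > 1:
--         return False
--     return True
-- ===== SOURCE B (Python) =====
-- def validar_entry(texto):
--     if texto == "":
--         return True
--     dots = 0
--     for c in texto:
--         if c == ".":
--             dots += 1
--             if dots > 1:
--                 return False
--         elif not c.isdigit():
--             return False
--     return True
-- ===== Notes on version B (the rewrite author's own statement) =====
-- stated objective: alternative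
-- what changed: Replaced A's two separate linear passes (all(...) over chars, then a full count-the-dots scan) by one early-exiting pass maintaining a dot counter.
import Mathlib
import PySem

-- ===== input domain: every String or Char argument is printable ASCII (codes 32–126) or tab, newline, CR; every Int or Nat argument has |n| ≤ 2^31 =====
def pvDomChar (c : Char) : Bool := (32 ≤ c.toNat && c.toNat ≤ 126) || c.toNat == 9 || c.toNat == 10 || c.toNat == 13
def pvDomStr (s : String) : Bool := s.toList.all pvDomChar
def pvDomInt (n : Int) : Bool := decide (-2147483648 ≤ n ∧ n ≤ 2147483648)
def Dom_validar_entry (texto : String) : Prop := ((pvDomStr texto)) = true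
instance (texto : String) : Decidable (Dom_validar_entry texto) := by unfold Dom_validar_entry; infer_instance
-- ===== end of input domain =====

-- B replaces A's two separate scans (membership check, then dot count) by one early-exiting pass
-- with a dot counter; same cost, different decomposition.

-- ===== PORT A =====
def validar_entry (texto : String) : Bool :=
  if texto == "" then true
  else if ¬ (texto.toList.all (fun c => PySem.Chars.isdigit c || c == '.')) then false
  else if PySem.Str.count texto "." > 1 then false
  else true

-- ===== PORT B =====
def validar_entry_loop : List Char → Nat → Bool
  | [], _ => true
  | c :: rest, dots =>
    if c == '.' then
      if dots + 1 > 1 then false else validar_entry_loop rest (dots + 1)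
    else if ¬ PySem.Chars.isdigit c then false
    else validar_entry_loop rest dots

def validar_entry_alt (texto : String) : Bool :=
  if texto == "" then true
  else validar_entry_loop texto.toList 0

-- ===== PRECONDITION & SPEC =====
def Spec_validar_entry (texto : String) (out : Bool) : Prop := out = validar_entry_alt texto
instance (texto : String) (out : Bool) : Decidable (Spec_validar_entry texto out) := by unfold Spec_validar_entry; infer_instance

-- ===== CLAIM (what is proved, stated in full; the proofs are below) =====
def Claim_equal_validar_entry : Prop := ∀ (texto : String), Dom_validar_entry texto → Spec_validar_entry texto (validar_entry texto)

-- ===== LEMMAS AND PROOFS =====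
theorem count_go_singleton (c : Char) (l : List Char) (fuel acc : Nat)
    (h : l.length ≤ fuel) :
    PySem.Chars.count.go [c] fuel l acc = acc + l.count c := by
  induction l generalizing fuel acc with
  | nil => cases fuel <;> simp [PySem.Chars.count.go]
  | cons x xs ih =>
    cases fuel with
    | zero => simp at h
    | succ n =>
      have hstep : PySem.Chars.count.go [c] (n + 1) (x :: xs) acc =
          if c == x then PySem.Chars.count.go [c] n xs (acc + 1)
          else PySem.Chars.count.go [c] n xs acc := by
        simp [PySem.Chars.count.go, List.isPrefixOf]
      rw [hstep]
      by_cases hx : c = x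
      · subst hx
        rw [if_pos (by simp), ih n (acc + 1) (by simpa using h)]
        simp [List.count_cons]
        omega
      · rw [if_neg (by simp [hx]), ih n acc (by simpa using h)]
        simp [List.count_cons, eq_comm, hx]

theorem chars_count_singleton (l : List Char) (c : Char) :
    PySem.Chars.count l [c] = l.count c := by
  simp [PySem.Chars.count, count_go_singleton c l l.length 0 le_rfl]

theorem loop_eq (l : List Char) (d : Nat) (hd : d ≤ 1) :
    validar_entry_loop l d =
      (l.all (fun c => PySem.Chars.isdigit c || c == '.') && decide (d + l.count '.' ≤ 1)) := by
  induction l generalizing d with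
  | nil => simp [validar_entry_loop]; omega
  | cons c rest ih =>
    by_cases hc : c = '.'
    · subst hc
      by_cases h2 : d + 1 > 1
      · have : ¬ (d + List.count '.' ('.' :: rest) ≤ 1) := by
          simp [List.count_cons]; omega
        simp [validar_entry_loop, h2, this]
        intro _
        simp [List.count_cons] at this
        omega
      · have hd0 : d = 0 := by omega
        subst hd0
        have hstep : validar_entry_loop ('.' :: rest) 0 = validar_entry_loop rest 1 := by
          simp [validar_entry_loop]
        rw [hstep, ih 1 (by norm_num)]
        have : (1 + List.count '.' rest ≤ 1) ↔ (0 + List.count '.' ('.' :: rest) ≤ 1) := by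
          simp [List.count_cons]
        simp [this]
    · have hne : (c == '.') = false := by simp [hc]
      by_cases hdg : PySem.Chars.isdigit c
      · simp [validar_entry_loop, hne, hdg, ih d hd, List.count_cons, hc, eq_comm]
      · simp [validar_entry_loop, hne, hdg]

-- ===== VERDICT (by name: the statement is the Claim_ definition above) =====
theorem validar_entry_spec : Claim_equal_validar_entry := by
  intro texto _
  unfold Spec_validar_entry validar_entry validar_entry_alt
  by_cases he : texto == ""
  · simp [he]
  · simp only [he, if_false]
    rw [loop_eq _ 0 (by norm_num)]
    have hc : PySem.Str.count texto "." = texto.toList.count '.' := by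
      rw [← chars_count_singleton texto.toList '.']
      simp [PySem.Str.count]
    rw [hc] at *
    by_cases ha : texto.toList.all (fun c => PySem.Chars.isdigit c || c == '.')
    · simp [ha]
      by_cases h1 : texto.toList.count '.' > 1 <;> simp [h1] <;> omega
    · simp [ha]
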